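-- pv_equiv track=rewrite | github.com/lf2netxp/livestream_dl | download_Live.py | universal_sanitize
-- ===== SOURCE A (Python) =====
-- def universal_sanitize(text):
--     if not text: return ""
--
--     # Map dangerous ASCII to safe "Fullwidth" Unicode equivalents
--     # Shells (Windows/Linux) treat these as normal text characters.
--     replacements = {
--         '&': '＆',  # Fullwidth Ampersand (Fixes your 'pp' crash)
--         '|': '｜',  # Fullwidth Pipe
--         '<': '＜',  # Fullwidth Less-Than
--         '>': '＞',  # Fullwidth Greater-Than
--         '"': '＂',  # Fullwidth Quote
--         '^': '＾',  # Fullwidth Caret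
--         ';': '；',  # Fullwidth Semicolon
--         '$': '＄',  # Fullwidth Dollar Sign
--     }
--
--     for char, replacement in replacements.items():
--         text = text.replace(char, replacement)
--
--     # Hard truncation to stay safe within the 8,191 limit
--     # We leave room for the rest of the ffmpeg command.
--     return (text[:6144] + '...') if len(text) > 6144 else text
-- ===== SOURCE B (Python) =====
-- def _fullwidth(c):
--     if c == '&': return '\uFF06'
--     if c == '|': return '\uFF5C'
--     if c == '<': return '\uFF1C'
--     if c == '>': return '\uFF1E'
--     if c == '"': return '\uFF02'
--     if c == '^': return '\uFF3E'
--     if c == ';': return '\uFF1B'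
--     if c == '$': return '\uFF04'
--     return c
--
-- def universal_sanitize(text):
--     # every replacement is one char for one char, so the length never changes:
--     # truncate FIRST, then sanitize only the kept prefix in a single pass.
--     if len(text) > 6144:
--         return ''.join(_fullwidth(c) for c in text[:6144]) + '...'
--     return ''.join(_fullwidth(c) for c in text)
-- ===== Notes on version B (the rewrite author's own statement) =====
-- stated objective: alternative
-- what changed: A runs eight full-string replace passes over the entire input and truncates afterwards; B truncates first (valid because all replacements are one-char-for-one-char, so length is preserved) and then sanitizes only the kept 6144-char prefix in a single per-character pass with an if-chain mapping, never scanning past the truncation point.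
import Mathlib
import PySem

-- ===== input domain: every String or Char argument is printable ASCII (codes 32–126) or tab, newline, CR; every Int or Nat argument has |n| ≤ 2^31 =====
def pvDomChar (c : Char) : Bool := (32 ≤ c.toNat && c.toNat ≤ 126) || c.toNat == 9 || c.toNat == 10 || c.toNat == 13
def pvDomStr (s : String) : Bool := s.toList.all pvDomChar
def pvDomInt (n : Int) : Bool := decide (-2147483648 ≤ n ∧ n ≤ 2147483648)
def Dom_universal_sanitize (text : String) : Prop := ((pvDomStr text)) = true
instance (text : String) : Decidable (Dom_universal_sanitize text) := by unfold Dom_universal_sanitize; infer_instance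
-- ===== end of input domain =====

-- B truncates FIRST (all replacements are one char for one char, so length is preserved) and then
-- sanitizes only the kept prefix in a single per-character pass; A replaces over the whole string
-- eight times and truncates last (objective: alternative decomposition).

-- ===== PORT A =====
-- the dict literal `replacements`, in insertion order
def pvRepl : List (Char × Char) :=
  [('&','＆'),('|','｜'),('<','＜'),('>','＞'),('"','＂'),('^','＾'),(';','；'),('$','＄')]

def universal_sanitize (text : String) : String :=
  if text = "" then ""
  else
    -- for char, replacement in replacements.items(): text = text.replace(char, replacement)
    let t := pvRepl.foldl (fun s p => PySem.Chars.replace s [p.1] [p.2]) text.toList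
    -- return (text[:6144] + '...') if len(text) > 6144 else text
    String.ofList (if 6144 < t.length then PySem.List.slice t none (some 6144) ++ "...".toList else t)

-- ===== PORT B =====
-- def _fullwidth(c): if-chain mapping one dangerous char to its fullwidth form
def pvFullwidth (c : Char) : Char :=
  if c = '&' then '＆'
  else if c = '|' then '｜'
  else if c = '<' then '＜'
  else if c = '>' then '＞'
  else if c = '"' then '＂'
  else if c = '^' then '＾'
  else if c = ';' then '；'
  else if c = '$' then '＄'
  else c

def universal_sanitize_alt (text : String) : String :=
  -- if len(text) > 6144: return ''.join(_fullwidth(c) for c in text[:6144]) + '...'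
  if 6144 < text.toList.length then
    String.ofList ((PySem.List.slice text.toList none (some 6144)).map pvFullwidth ++ "...".toList)
  else
    -- return ''.join(_fullwidth(c) for c in text)
    String.ofList (text.toList.map pvFullwidth)

-- ===== PRECONDITION & SPEC =====
def Spec_universal_sanitize (text : String) (out : String) : Prop := out = universal_sanitize_alt text
instance (text : String) (out : String) : Decidable (Spec_universal_sanitize text out) := by unfold Spec_universal_sanitize; infer_instance

-- ===== CLAIM =====
def Claim_equal_universal_sanitize : Prop := ∀ (text : String), Dom_universal_sanitize text → Spec_universal_sanitize text (universal_sanitize text)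

-- ===== LEMMAS AND PROOFS =====

-- Python's s.replace(old, new) for a one-char old and one-char new is a per-character map.
theorem pv_go_single (c d : Char) : ∀ (fuel : Nat) (l acc : List Char), l.length ≤ fuel →
    PySem.Chars.replace.go [c] [d] fuel l acc
      = acc.reverse ++ l.map (fun x => if x = c then d else x) := by
  intro fuel
  induction fuel with
  | zero =>
    intro l acc h
    have hl : l = [] := List.eq_nil_of_length_eq_zero (Nat.le_zero.mp h)
    simp [hl, PySem.Chars.replace.go]
  | succ n ih =>
    intro l acc h
    cases l with
    | nil => simp [PySem.Chars.replace.go]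
    | cons x t =>
      by_cases hx : x = c
      · subst hx
        rw [PySem.Chars.replace.go]
        simp only [List.isPrefixOf_cons₂]
        simp [List.isPrefixOf, ih t _ (by simpa using h)]
      · rw [PySem.Chars.replace.go]
        have : [c].isPrefixOf (x :: t) = false := by
          simp [List.isPrefixOf]; exact fun h => absurd h.symm hx
        simp [this, ih t _ (by simpa using h), hx]

theorem pv_replace_single (cs : List Char) (c d : Char) :
    PySem.Chars.replace cs [c] [d] = cs.map (fun x => if x = c then d else x) := by
  rw [PySem.Chars.replace]
  simp [pv_go_single c d cs.length cs [] le_rfl]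

-- a sequence of one-char replaces is a single map of the composed per-char function
theorem pv_foldl_replace (ps : List (Char × Char)) (cs : List Char) :
    ps.foldl (fun s p => PySem.Chars.replace s [p.1] [p.2]) cs
      = cs.map (fun c => ps.foldl (fun y p => if y = p.1 then p.2 else y) c) := by
  induction ps generalizing cs with
  | nil => simp
  | cons p ps ih =>
    rw [List.foldl_cons, pv_replace_single, ih, List.map_map]
    simp [Function.comp_def]

-- per character, A's composed replacement chain is B's if-chain
theorem pv_char_eq (x : Char) :
    pvRepl.foldl (fun y p => if y = p.1 then p.2 else y) x = pvFullwidth x := by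
  by_cases h1 : x = '&'; · subst h1; decide
  by_cases h2 : x = '|'; · subst h2; decide
  by_cases h3 : x = '<'; · subst h3; decide
  by_cases h4 : x = '>'; · subst h4; decide
  by_cases h5 : x = '"'; · subst h5; decide
  by_cases h6 : x = '^'; · subst h6; decide
  by_cases h7 : x = ';'; · subst h7; decide
  by_cases h8 : x = '$'; · subst h8; decide
  simp [pvRepl, pvFullwidth, h1, h2, h3, h4, h5, h6, h7, h8]

theorem pv_core_eq (cs : List Char) :
    pvRepl.foldl (fun s p => PySem.Chars.replace s [p.1] [p.2]) cs = cs.map pvFullwidth := by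
  rw [pv_foldl_replace]
  exact List.map_congr_left (fun x _ => pv_char_eq x)

-- ===== VERDICT =====
theorem universal_sanitize_spec : Claim_equal_universal_sanitize := by
  intro text _
  unfold Spec_universal_sanitize universal_sanitize universal_sanitize_alt
  by_cases h : text = ""
  · simp [h]
  · simp only [h, if_false, pv_core_eq, List.length_map]
    have hsl : PySem.List.slice (text.toList.map pvFullwidth) none (some 6144)
        = (PySem.List.slice text.toList none (some 6144)).map pvFullwidth := by
      rw [PySem.List.slice_to _ (by norm_num), PySem.List.slice_to _ (by norm_num),
          List.map_take]
    split_ifs with hl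
    · rw [hsl]
    · rfl
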